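-- pv_equiv track=rewrite | github.com/Iamadimanna/DATA-STRUCTURE-VISUALSER | ENCRYPT-DECRYPT/main.py | step_4
-- ===== SOURCE A (Python) =====
-- def step_4(sentence):
--     encrypted = ""
--     alphabet = "ABCDEFGHIJKLMNOPQRSTUVWXYZ"
--     for i, char in enumerate(sentence):
--         if i % 2 == 1:
--             idx = i // 2 % len(alphabet)
--             encrypted += alphabet[idx]
--         encrypted += char
--     return encrypted
-- ===== SOURCE B (Python) =====
-- def step_4(sentence):
--     alphabet = "ABCDEFGHIJKLMNOPQRSTUVWXYZ"
--     ev = sentence[0::2]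
--     od = sentence[1::2]
--     letters = [alphabet[p % 26] for p in range(len(od))]
--     return "".join(e + l + o for e, l, o in zip(ev, letters, od)) + ev[len(od):]
-- ===== Notes on version B (the rewrite author's own statement) =====
-- stated objective: alternative
-- what changed: B splits the sentence into the even-index and odd-index subsequences by strided slicing, builds the cyclic letter list once from range(len(odds)), and interleaves the three sequences with zip plus the leftover even tail, instead of A's single enumerate loop with a per-character parity test and repeated string concatenation.
import Mathlib
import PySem

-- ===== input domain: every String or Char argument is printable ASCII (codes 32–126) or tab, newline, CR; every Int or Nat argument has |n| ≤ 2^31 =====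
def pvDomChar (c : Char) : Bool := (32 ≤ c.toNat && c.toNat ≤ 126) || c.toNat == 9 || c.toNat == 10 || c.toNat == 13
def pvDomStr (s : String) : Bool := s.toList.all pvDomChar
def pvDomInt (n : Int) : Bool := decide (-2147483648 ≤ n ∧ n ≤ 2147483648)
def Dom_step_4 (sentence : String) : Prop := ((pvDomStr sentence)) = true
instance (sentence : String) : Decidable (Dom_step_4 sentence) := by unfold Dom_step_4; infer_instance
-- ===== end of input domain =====

-- B rebuilds the result from the even/odd strided slices zipped with a precomputed
-- cyclic letter list (alternative decomposition; staged passes instead of one indexed loop).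

-- ===== PORT A =====
def pvAlph : List Char := "ABCDEFGHIJKLMNOPQRSTUVWXYZ".toList

-- A's loop: enumerate(sentence), insert alphabet[i//2 % 26] before odd-indexed chars.
def pvAGo : List Char → Nat → List Char → List Char
  | [], _, acc => acc
  | c :: rest, i, acc =>
      pvAGo rest (i + 1)
        (if i % 2 == 1 then acc ++ [pvAlph.getD (i / 2 % 26) ' ', c] else acc ++ [c])

def step_4 (sentence : String) : String := String.mk (pvAGo sentence.toList 0 [])

-- ===== PORT B =====
-- sentence[0::2] (step-2 slice, ported by hand; exact: takes chars at even positions)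
def pvEvens : List Char → List Char
  | [] => []
  | [c] => [c]
  | c :: _ :: rest => c :: pvEvens rest

-- sentence[1::2] (step-2 slice, ported by hand; exact: takes chars at odd positions)
def pvOdds : List Char → List Char
  | [] => []
  | [_] => []
  | _ :: c :: rest => c :: pvOdds rest

-- [alphabet[p % 26] for p in range(len(od))]
def pvLetters (n : Nat) : List Char := (List.range n).map (fun p => pvAlph.getD (p % 26) ' ')

-- "".join(e + l + o for e, l, o in zip(ev, letters, od)) — zip stops at the shortest list
def pvZip3 : List Char → List Char → List Char → List Char
  | e :: es, l :: ls, o :: os => e :: l :: o :: pvZip3 es ls os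
  | _, _, _ => []

def step_4_alt (sentence : String) : String :=
  let t := sentence.toList
  let ev := pvEvens t
  let od := pvOdds t
  String.mk (pvZip3 ev (pvLetters od.length) od ++ ev.drop od.length)

-- ===== PRECONDITION & SPEC =====
def Spec_step_4 (sentence : String) (out : String) : Prop := out = step_4_alt sentence
instance (sentence : String) (out : String) : Decidable (Spec_step_4 sentence out) := by unfold Spec_step_4; infer_instance

-- ===== CLAIM (what is proved, stated in full; the proofs are below) =====
def Claim_equal_step_4 : Prop := ∀ (sentence : String), Dom_step_4 sentence → Spec_step_4 sentence (step_4 sentence)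

-- ===== LEMMAS AND PROOFS =====
-- letters starting from pair counter p (generalisation of pvLetters for the induction)
def pvLettersFrom (p n : Nat) : List Char := (List.range n).map (fun k => pvAlph.getD ((p + k) % 26) ' ')

theorem pvLettersFrom_zero (n : Nat) : pvLettersFrom 0 n = pvLetters n := by
  simp [pvLettersFrom, pvLetters]

theorem pvLettersFrom_succ (p n : Nat) :
    pvLettersFrom p (n + 1) = pvAlph.getD (p % 26) ' ' :: pvLettersFrom (p + 1) n := by
  simp [pvLettersFrom, List.range_succ_eq_map, List.map_map, Function.comp]
  intro k _
  congr 2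
  omega

theorem pvAGo_eq : ∀ (l : List Char) (p : Nat) (acc : List Char),
    pvAGo l (2 * p) acc =
      acc ++ pvZip3 (pvEvens l) (pvLettersFrom p (pvOdds l).length) (pvOdds l)
          ++ (pvEvens l).drop (pvOdds l).length
  | [], _, _ => by simp [pvAGo, pvEvens, pvOdds, pvLettersFrom, pvZip3]
  | [c], p, acc => by
      have h0 : (2 * p) % 2 = 0 := by omega
      simp [pvAGo, pvEvens, pvOdds, pvLettersFrom, pvZip3, h0]
  | c1 :: c2 :: rest, p, acc => by
      have h0 : (2 * p) % 2 = 0 := by omega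
      have h1 : (2 * p + 1) % 2 = 1 := by omega
      have hdiv : (2 * p + 1) / 2 = p := by omega
      have hnext : 2 * p + 1 + 1 = 2 * (p + 1) := by ring
      simp only [pvAGo, h0, h1, hdiv, hnext, beq_iff_eq, if_true, if_false,
        Nat.zero_ne_one, pvEvens, pvOdds, List.length_cons, pvLettersFrom_succ, pvZip3,
        List.drop_succ_cons]
      rw [pvAGo_eq rest (p + 1)]
      simp

-- ===== VERDICT (by name: the statement is the Claim_ definition above) =====
theorem step_4_spec : Claim_equal_step_4 := by
  intro s _
  show step_4 s = step_4_alt s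
  unfold step_4 step_4_alt
  rw [show (0 : Nat) = 2 * 0 by rfl, pvAGo_eq, pvLettersFrom_zero]
  simp
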